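-- pv_equiv track=rewrite | github.com/sgotling/exjobb | client.py | reverseRead
-- ===== SOURCE A (Python) =====
-- def reverseRead(strIn, chunkLen):
--     """
--     Läser av en sträng av siffror bakifrån och fyller på med nollor för att skapa lika långa 'chunks' i en lista.
--     Listan vänds för att ge rätt ordning och returneras.
--     """
--     chunk = ""               #Tillfällig sträng att konstruera bitar i
--     i=len(strIn)-chunkLen      #Startposition för att läsa av strängen bakifrån
--     returnList=[]              #Lista för alla bitar krypterbar längd
--     goOn = True
--     while goOn:
--         for j in range(i, i+chunkLen):      #Läs av hela strängen...
--             if j<0: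
--                 goOn=False
--             else:
--                 chunk+=strIn[j]
--         i-=chunkLen                         #...clip för clip
--         if len(chunk)>0:
--             returnList.append(chunk)
--         chunk=""
--
--     returnList.reverse()
--     return returnList      #Vänd rätt listan
-- ===== SOURCE B (Python) =====
-- def reverseRead(strIn, chunkLen):
--     """Split strIn into chunkLen-sized pieces counted from the end (first piece may be shorter)."""
--     result = []
--     i = len(strIn)
--     while i > 0:
--         result.append(strIn[max(0, i - chunkLen):i])
--         i -= chunkLen
--     result.reverse()
--     return result
-- ===== Notes on version B (the rewrite author's own statement) =====
-- stated objective: simpler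
-- what changed: Replaced the goOn-sentinel while loop with a per-character inner loop and chunk accumulator by a single flat loop that appends one slice strIn[max(0,i-chunkLen):i] per iteration.
import Mathlib
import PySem

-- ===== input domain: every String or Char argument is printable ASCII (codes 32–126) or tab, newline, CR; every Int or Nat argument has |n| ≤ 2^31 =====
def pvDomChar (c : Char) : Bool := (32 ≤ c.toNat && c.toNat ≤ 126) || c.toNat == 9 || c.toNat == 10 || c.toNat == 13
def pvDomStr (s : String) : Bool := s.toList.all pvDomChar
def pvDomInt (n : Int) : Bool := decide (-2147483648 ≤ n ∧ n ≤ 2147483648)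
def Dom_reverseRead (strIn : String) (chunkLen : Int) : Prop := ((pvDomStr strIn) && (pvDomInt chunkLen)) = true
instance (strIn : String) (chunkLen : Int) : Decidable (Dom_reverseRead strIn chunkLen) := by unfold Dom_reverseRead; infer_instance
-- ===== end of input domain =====

-- B replaces A's goOn sentinel, per-character inner loop and chunk accumulator by one
-- flat slicing loop from the end of the string (objective: simpler; same O(n) cost).

-- ===== PORT A =====
-- inner for-loop body: 'if j<0: goOn=False else: chunk += strIn[j]' on state (goOn, chunk)
def pvStep (s : List Char) (st : Bool × List Char) (j : Int) : Bool × List Char :=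
  if j < 0 then (false, st.2) else (st.1, st.2 ++ [(PySem.List.pyGet? s j).getD ' '])

-- the while loop: inner for over range(i, i+chunkLen), conditional append, i -= chunkLen;
-- fuel only makes the while total (A never terminates for chunkLen ≤ 0, excluded by Pre_;
-- under Pre_ the fuel s.length + 1 is never exhausted).
def pvALoop (s : List Char) (c : Int) : Nat → Int → List (List Char) → List (List Char)
  | 0, _, acc => acc
  | Nat.succ f, i, acc =>
    let st := (PySem.List.pyRange i (i + c) 1).foldl (pvStep s) (true, [])
    let acc' := if st.2.length > 0 then acc ++ [st.2] else acc
    if st.1 then pvALoop s c f (i - c) acc' else acc'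

def reverseRead (strIn : String) (chunkLen : Int) : List String :=
  ((pvALoop strIn.toList chunkLen (strIn.toList.length + 1)
      ((strIn.toList.length : Int) - chunkLen) []).reverse).map String.ofList

-- ===== PORT B =====
-- Source B's 'while i > 0' loop: append the slice strIn[max(0, i-chunkLen):i], step i down.
def pvBLoop (s : List Char) (c : Int) : Nat → Int → List (List Char) → List (List Char)
  | 0, _, acc => acc
  | Nat.succ f, i, acc =>
    if i > 0 then
      pvBLoop s c f (i - c) (acc ++ [PySem.List.slice s (some (max 0 (i - c))) (some i)])
    else acc

def reverseRead_alt (strIn : String) (chunkLen : Int) : List String :=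
  ((pvBLoop strIn.toList chunkLen (strIn.toList.length + 1)
      (strIn.toList.length : Int) []).reverse).map String.ofList

-- ===== PRECONDITION & SPEC =====
-- Pre_ excludes chunkLen ≤ 0, on which Python A's while loop never terminates (A never returns).
def Pre_reverseRead (strIn : String) (chunkLen : Int) : Prop := 1 ≤ chunkLen
instance (strIn : String) (chunkLen : Int) : Decidable (Pre_reverseRead strIn chunkLen) := by unfold Pre_reverseRead; infer_instance
def pvWitness_reverseRead : String × Int := ("hello", 2)

def Spec_reverseRead (strIn : String) (chunkLen : Int) (out : List String) : Prop := out = reverseRead_alt strIn chunkLen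
instance (strIn : String) (chunkLen : Int) (out : List String) : Decidable (Spec_reverseRead strIn chunkLen out) := by unfold Spec_reverseRead; infer_instance

-- ===== CLAIM (what is proved, stated in full; the proofs are below) =====
def Claim_equal_reverseRead : Prop := ∀ (strIn : String) (chunkLen : Int), Dom_reverseRead strIn chunkLen → Pre_reverseRead strIn chunkLen → Spec_reverseRead strIn chunkLen (reverseRead strIn chunkLen)

-- ===== LEMMAS AND PROOFS =====

-- inner loop over a range of nonnegative indices: goOn unchanged, chunk gains s[a:a+n]
lemma pvInner_nonneg (s : List Char) :
    ∀ (n : Nat) (a : Int) (g : Bool) (ch : List Char), 0 ≤ a → a + n ≤ (s.length : Int) →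
      (PySem.List.pyRange a (a + n) 1).foldl (pvStep s) (g, ch)
        = (g, ch ++ (s.drop a.toNat).take n) := by
  intro n
  induction n with
  | zero => intro a g ch _ _; simp
  | succ n ih =>
    intro a g ch ha hb
    rw [PySem.List.pyRange_one_cons (by omega : a < a + (n+1 : Nat))]
    simp only [List.foldl_cons]
    have hstep : pvStep s (g, ch) a = (g, ch ++ [s[a.toNat]]) := by
      have h2 : a < (s.length : Int) := by push_cast at hb; omega
      simp [pvStep, if_neg (by omega : ¬ a < 0), PySem.List.pyGet?_eq_some_getElem s ha h2]
    rw [hstep]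
    have e : a + ((n : Int) + 1) = (a + 1) + (n : Int) := by ring
    push_cast
    rw [e, ih (a + 1) g (ch ++ [s[a.toNat]]) (by omega) (by push_cast at hb ⊢; omega)]
    have hlt : a.toNat < s.length := by omega
    have e2 : (a + 1).toNat = a.toNat + 1 := by omega
    rw [e2]
    conv_rhs => rw [List.drop_eq_getElem_cons hlt, List.take_succ_cons]
    simp

-- inner loop over a range of all-negative indices: chunk unchanged, goOn cleared (if nonempty)
lemma pvInner_negseg (s : List Char) :
    ∀ (n : Nat) (a : Int) (g : Bool) (ch : List Char), a + n ≤ 0 →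
      (PySem.List.pyRange a (a + n) 1).foldl (pvStep s) (g, ch)
        = (if n = 0 then g else false, ch) := by
  intro n
  induction n with
  | zero => intro a g ch _; simp
  | succ n ih =>
    intro a g ch h
    rw [PySem.List.pyRange_one_cons (by omega : a < a + (n+1 : Nat))]
    simp only [List.foldl_cons]
    have hstep : pvStep s (g, ch) a = (false, ch) := by
      unfold pvStep; rw [if_pos (by omega)]
    rw [hstep]
    have e : a + ((n : Int) + 1) = (a + 1) + (n : Int) := by ring
    push_cast
    rw [e, ih (a + 1) false ch (by push_cast at h ⊢; omega)]
    simp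

-- A's inner for-loop from a negative start: goOn becomes false, chunk is s[0:b]
lemma pvInner_neg (s : List Char) (a b : Int) (ha : a < 0) (hab : a < b)
    (hb : b ≤ (s.length : Int)) :
    (PySem.List.pyRange a b 1).foldl (pvStep s) (true, ([] : List Char))
      = (false, s.take b.toNat) := by
  by_cases hb0 : b ≤ 0
  · rw [show PySem.List.pyRange a b 1 = PySem.List.pyRange a (a + (((b - a).toNat : Nat) : Int)) 1
        from by congr 1; omega]
    rw [pvInner_negseg s (b - a).toNat a true [] (by omega), if_neg (by omega)]
    rw [show b.toNat = 0 from by omega]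
    simp
  · have hb0 : 0 < b := by omega
    rw [PySem.List.pyRange_one_append a 0 b (by omega) (by omega), List.foldl_append]
    have e0 : (0 : Int) = a + (((-a).toNat : Nat) : Int) := by omega
    rw [show PySem.List.pyRange a 0 1 = PySem.List.pyRange a (a + (((-a).toNat : Nat) : Int)) 1 by rw [← e0]]
    rw [pvInner_negseg s (-a).toNat a true [] (by omega), if_neg (by omega)]
    have e1 : b = (0 : Int) + ((b.toNat : Nat) : Int) := by omega
    rw [show PySem.List.pyRange 0 b 1 = PySem.List.pyRange 0 ((0:Int) + ((b.toNat : Nat) : Int)) 1 by rw [← e1]]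
    rw [pvInner_nonneg s b.toNat 0 false [] (by omega) (by omega)]
    simp

lemma pvBLoop_nonpos (s : List Char) (c : Int) (f : Nat) (i : Int) (acc : List (List Char))
    (h : ¬ i > 0) : pvBLoop s c f i acc = acc := by
  cases f <;> simp [pvBLoop, h]

-- the two while loops agree, aligned at i (A) = i + c (B)
lemma pvLoop_eq (s : List Char) (c : Int) (hc : 1 ≤ c) :
    ∀ (f : Nat) (i : Int) (acc : List (List Char)), i + c ≤ (s.length : Int) →
      pvALoop s c f i acc = pvBLoop s c f (i + c) acc := by
  intro f
  induction f with
  | zero => intro i acc _; rfl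
  | succ f ih =>
    intro i acc hlen
    by_cases hi : 0 ≤ i
    · -- full chunk s[i:i+c], loop continues
      have einner : (PySem.List.pyRange i (i + c) 1).foldl (pvStep s) (true, [])
          = (true, (s.drop i.toNat).take c.toNat) := by
        have e : i + c = i + ((c.toNat : Nat) : Int) := by omega
        rw [show PySem.List.pyRange i (i+c) 1 = PySem.List.pyRange i (i + ((c.toNat : Nat) : Int)) 1 by rw [← e]]
        exact pvInner_nonneg s c.toNat i true [] hi (by omega)
      have hchunk : ((s.drop i.toNat).take c.toNat).length > 0 := by
        simp only [List.length_take, List.length_drop]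
        omega
      have hslice : PySem.List.slice s (some (max 0 (i + c - c))) (some (i + c))
          = (s.drop i.toNat).take c.toNat := by
        rw [show max 0 (i + c - c) = i by omega,
            PySem.List.slice_toNat s hi (by omega : (0:Int) ≤ i + c)]
        congr 1
        omega
      simp only [pvALoop, pvBLoop, einner]
      rw [if_pos hchunk, if_pos (by omega : i + c > 0), hslice, if_pos trivial]
      rw [show i + c - c = i - c + c from by ring]
      exact ih (i - c) (acc ++ [(s.drop i.toNat).take c.toNat]) (by omega)
    · have hi : i < 0 := by omega
      by_cases hpos : 0 < i + c
      · -- partial final chunk s[0:i+c], loop stops on both sides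
        have einner := pvInner_neg s i (i + c) hi (by omega) hlen
        have hchunk : (s.take (i + c).toNat).length > 0 := by
          simp only [List.length_take]
          omega
        have hslice : PySem.List.slice s (some (max 0 (i + c - c))) (some (i + c))
            = s.take (i + c).toNat := by
          rw [show max 0 (i + c - c) = 0 by omega]
          simp only [PySem.List.slice_zero_start]
          exact PySem.List.slice_to s (by omega)
        simp only [pvALoop, pvBLoop, einner]
        rw [if_pos hchunk, if_pos hpos, hslice, if_neg (by simp)]
        rw [pvBLoop_nonpos s c f (i + c - c) _ (by omega)]
      · -- empty chunk, both loops stop with acc unchanged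
        have einner := pvInner_neg s i (i + c) hi (by omega) hlen
        have : (i + c).toNat = 0 := by omega
        rw [this] at einner
        simp only [pvALoop, pvBLoop, einner]
        rw [if_neg (by simp), if_neg (by simp), if_neg (by omega)]

-- ===== VERDICT (by name: the statement is the Claim_ definition above) =====
theorem reverseRead_spec : Claim_equal_reverseRead := by
  intro strIn chunkLen _hd hpre
  unfold Spec_reverseRead reverseRead reverseRead_alt
  have h := pvLoop_eq strIn.toList chunkLen hpre (strIn.toList.length + 1)
      ((strIn.toList.length : Int) - chunkLen) [] (by omega)
  rw [show (strIn.toList.length : Int) - chunkLen + chunkLen = (strIn.toList.length : Int)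
      from by ring] at h
  rw [h]
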